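-- pv_equiv track=rewrite | github.com/chimmy107/artificial-intelligence-code | group1-section2/twelve_coin_test.py | weigh_coins
-- ===== SOURCE A (Python) =====
-- def weight(coin, fake_coin, fake_type):
--     if coin != fake_coin:
--         return 1
--     return 2 if fake_type == "heavy" else 0
--
-- def weigh_coins(left, right, fake_coin, fake_type):
--     """Weigh two groups of coins and return the result"""
--     left_weight = sum(weight(c, fake_coin, fake_type) for c in left)
--     right_weight = sum(weight(c, fake_coin, fake_type) for c in right)
--
--     if left_weight > right_weight:
--         return "left_heavier"
--     elif right_weight > left_weight:
--         return "right_heavier"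
--     else:
--         return "balanced"
-- ===== SOURCE B (Python) =====
-- def weigh_coins(left, right, fake_coin, fake_type):
--     """Simulate the balance directly: pair off one coin from each pan (equal-status
--     pairs cancel, a fake/genuine pair tips the scale by one unit), then weigh the
--     leftover coins of the longer pan; report the sign of the accumulated tilt."""
--     L, R = list(left), list(right)
--     tilt = 1 if fake_type == "heavy" else -1
--     bal = 0
--     n = min(len(L), len(R))
--     for a, b in zip(L, R):
--         if a == fake_coin and b != fake_coin:
--             bal += tilt
--         elif b == fake_coin and a != fake_coin:
--             bal -= tilt
--     for c in L[n:]: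
--         bal += 1 + (tilt if c == fake_coin else 0)
--     for c in R[n:]:
--         bal -= 1 + (tilt if c == fake_coin else 0)
--     return "left_heavier" if bal > 0 else "right_heavier" if bal < 0 else "balanced"
-- ===== Notes on version B (the rewrite author's own statement) =====
-- stated objective: alternative
-- what changed: Instead of summing each pan's total weight and comparing, B simulates the balance: it pairs off one coin from each pan (pairs of equal status cancel, a fake/genuine pair tilts by one unit), adds the weight of the longer pan's leftover coins, and reads off the sign of a single running tilt.
import Mathlib
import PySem

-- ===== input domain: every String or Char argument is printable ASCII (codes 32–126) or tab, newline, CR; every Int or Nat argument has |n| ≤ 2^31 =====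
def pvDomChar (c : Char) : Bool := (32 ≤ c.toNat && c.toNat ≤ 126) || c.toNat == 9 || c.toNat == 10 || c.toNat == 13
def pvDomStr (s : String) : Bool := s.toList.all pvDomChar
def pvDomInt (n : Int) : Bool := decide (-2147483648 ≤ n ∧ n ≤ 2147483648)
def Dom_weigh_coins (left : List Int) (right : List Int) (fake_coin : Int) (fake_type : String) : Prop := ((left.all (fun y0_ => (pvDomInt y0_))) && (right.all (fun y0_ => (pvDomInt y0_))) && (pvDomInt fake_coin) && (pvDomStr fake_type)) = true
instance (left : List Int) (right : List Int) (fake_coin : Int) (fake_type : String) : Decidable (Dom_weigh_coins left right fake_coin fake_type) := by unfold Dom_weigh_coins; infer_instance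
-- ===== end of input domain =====

-- B simulates the balance (pairwise cancellation plus the leftover coins, one signed tilt accumulator)
-- instead of summing and comparing the two pan weights; objective: alternative.
-- ===== PORT A =====
def pvWeight (coin : Int) (fake_coin : Int) (fake_type : String) : Int :=
  if coin != fake_coin then 1
  else if fake_type == "heavy" then 2 else 0

def weigh_coins (left : List Int) (right : List Int) (fake_coin : Int) (fake_type : String) : String :=
  let left_weight := left.foldl (fun acc c => acc + pvWeight c fake_coin fake_type) 0
  let right_weight := right.foldl (fun acc c => acc + pvWeight c fake_coin fake_type) 0
  if left_weight > right_weight then "left_heavier"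
  else if right_weight > left_weight then "right_heavier"
  else "balanced"

-- ===== PORT B =====
def weigh_coins_alt (left : List Int) (right : List Int) (fake_coin : Int) (fake_type : String) : String :=
  let tilt : Int := if fake_type == "heavy" then 1 else -1
  let n : Nat := min left.length right.length
  let bal0 : Int := (left.zip right).foldl (fun bal p =>
      if p.1 == fake_coin && p.2 != fake_coin then bal + tilt
      else if p.2 == fake_coin && p.1 != fake_coin then bal - tilt
      else bal) 0
  let bal1 : Int := (PySem.List.slice left (some (n : Int)) none).foldl
      (fun bal c => bal + 1 + (if c == fake_coin then tilt else 0)) bal0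
  let bal2 : Int := (PySem.List.slice right (some (n : Int)) none).foldl
      (fun bal c => bal - (1 + (if c == fake_coin then tilt else 0))) bal1
  if bal2 > 0 then "left_heavier"
  else if bal2 < 0 then "right_heavier"
  else "balanced"

-- ===== PRECONDITION & SPEC =====
def Spec_weigh_coins (left : List Int) (right : List Int) (fake_coin : Int) (fake_type : String) (out : String) : Prop := out = weigh_coins_alt left right fake_coin fake_type
instance (left : List Int) (right : List Int) (fake_coin : Int) (fake_type : String) (out : String) : Decidable (Spec_weigh_coins left right fake_coin fake_type out) := by unfold Spec_weigh_coins; infer_instance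

-- ===== CLAIM (what is proved, stated in full; the proofs are below) =====
def Claim_equal_weigh_coins : Prop := ∀ (left : List Int) (right : List Int) (fake_coin : Int) (fake_type : String), Dom_weigh_coins left right fake_coin fake_type → Spec_weigh_coins left right fake_coin fake_type (weigh_coins left right fake_coin fake_type)

-- ===== LEMMAS AND PROOFS =====

-- A's weighing fold with a shifted accumulator.
theorem pvWsum_shift (f : Int) (t : String) (l : List Int) (s : Int) :
    l.foldl (fun acc c => acc + pvWeight c f t) s
      = s + l.foldl (fun acc c => acc + pvWeight c f t) 0 := by
  induction l generalizing s with
  | nil => simp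
  | cons a l ih => simp only [List.foldl_cons]; rw [ih, ih (0 + _)]; ring

-- One pair tips the scale by exactly the weight difference of its two coins.
theorem pvPair_step (f : Int) (t : String) (a b s : Int) :
    (if a == f && b != f then s + (if t == "heavy" then (1:Int) else -1)
     else if b == f && a != f then s - (if t == "heavy" then (1:Int) else -1)
     else s) = s + pvWeight a f t - pvWeight b f t := by
  by_cases ha : a = f <;> by_cases hb : b = f <;>
    by_cases ht : t = "heavy" <;> simp [pvWeight, ha, hb, ht] <;> ring

-- The zip fold equals the weight difference of the paired prefixes.
theorem pvZip_bal (f : Int) (t : String) :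
    ∀ (L R : List Int) (s : Int),
    (L.zip R).foldl (fun bal p =>
        if p.1 == f && p.2 != f then bal + (if t == "heavy" then (1:Int) else -1)
        else if p.2 == f && p.1 != f then bal - (if t == "heavy" then (1:Int) else -1)
        else bal) s
      = s + (L.take R.length).foldl (fun acc c => acc + pvWeight c f t) 0
          - (R.take L.length).foldl (fun acc c => acc + pvWeight c f t) 0
  | [], R, s => by simp
  | a :: L, [], s => by simp
  | a :: L, b :: R, s => by
      simp only [List.zip_cons_cons, List.foldl_cons, List.length_cons, List.take_succ_cons]
      rw [pvZip_bal f t L R, pvPair_step,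
        pvWsum_shift f t (L.take R.length) (0 + pvWeight a f t),
        pvWsum_shift f t (R.take L.length) (0 + pvWeight b f t)]
      ring

-- A leftover coin's increment 1 + (tilt if fake) is exactly its weight.
theorem pvLeft_drop (f : Int) (t : String) (l : List Int) (s : Int) :
    l.foldl (fun bal c => bal + 1 + (if c == f then (if t == "heavy" then (1:Int) else -1) else 0)) s
      = s + l.foldl (fun acc c => acc + pvWeight c f t) 0 := by
  induction l generalizing s with
  | nil => simp
  | cons a l ih =>
      simp only [List.foldl_cons]
      rw [ih, pvWsum_shift f t l (0 + pvWeight a f t)]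
      by_cases ha : a = f <;> by_cases ht : t = "heavy" <;>
        simp [pvWeight, ha, ht] <;> ring

theorem pvRight_drop (f : Int) (t : String) (l : List Int) (s : Int) :
    l.foldl (fun bal c => bal - (1 + (if c == f then (if t == "heavy" then (1:Int) else -1) else 0))) s
      = s - l.foldl (fun acc c => acc + pvWeight c f t) 0 := by
  induction l generalizing s with
  | nil => simp
  | cons a l ih =>
      simp only [List.foldl_cons]
      rw [ih, pvWsum_shift f t l (0 + pvWeight a f t)]
      by_cases ha : a = f <;> by_cases ht : t = "heavy" <;>
        simp [pvWeight, ha, ht] <;> ring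

-- take-prefix plus dropped suffix gives the whole pan's weight.
theorem pvTake_drop (f : Int) (t : String) (l : List Int) (n : Nat) :
    (l.take n).foldl (fun acc c => acc + pvWeight c f t) 0
      + (l.drop n).foldl (fun acc c => acc + pvWeight c f t) 0
      = l.foldl (fun acc c => acc + pvWeight c f t) 0 := by
  conv_rhs => rw [← List.take_append_drop n l]
  rw [List.foldl_append,
    pvWsum_shift f t (List.drop n l) ((List.take n l).foldl (fun acc c => acc + pvWeight c f t) 0)]

theorem pvBal_eq (L R : List Int) (f : Int) (t : String) :
    weigh_coins L R f t = weigh_coins_alt L R f t := by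
  simp only [weigh_coins, weigh_coins_alt, PySem.List.slice_from_natCast,
    pvRight_drop, pvLeft_drop, pvZip_bal]
  have hL : L.take R.length = L.take (min L.length R.length) := by
    rw [List.take_eq_take_iff]; omega
  have hR : R.take L.length = R.take (min L.length R.length) := by
    rw [List.take_eq_take_iff]; omega
  rw [hL, hR]
  have h1 := pvTake_drop f t L (min L.length R.length)
  have h2 := pvTake_drop f t R (min L.length R.length)
  set a1 := (L.take (min L.length R.length)).foldl (fun acc c => acc + pvWeight c f t) 0
  set a2 := (L.drop (min L.length R.length)).foldl (fun acc c => acc + pvWeight c f t) 0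
  set b1 := (R.take (min L.length R.length)).foldl (fun acc c => acc + pvWeight c f t) 0
  set b2 := (R.drop (min L.length R.length)).foldl (fun acc c => acc + pvWeight c f t) 0
  rw [← h1, ← h2]
  split_ifs <;> first | rfl | omega

-- ===== VERDICT (by name: the statement is the Claim_ definition above) =====
theorem weigh_coins_spec : Claim_equal_weigh_coins := by
  intro L R f t _
  exact pvBal_eq L R f t
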